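-- pv_equiv track=rewrite | github.com/KernAlan/osint-monitor | synthesize.py | categorize_by_region
-- ===== SOURCE A (Python) =====
-- def categorize_by_region(items, config):
--     """Categorize items by region."""
--     regions = config.get("regions", {})
--     categorized = {region: [] for region in regions}
--     categorized["other"] = []
--
--     for item in items:
--         text = f"{item.get('title', '')} {item.get('description', '')}"
--         matched = False
--
--         for region, data in regions.items():
--             for keyword in data.get("keywords", []):
--                 if keyword.lower() in text.lower():
--                     categorized[region].append(item)
--                     matched = True
--                     break
--             if matched:
--                 break
--
--         if not matched:
--             categorized["other"].append(item)
--
--     return categorized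
-- ===== SOURCE B (Python) =====
-- def categorize_by_region(items, config):
--     """Categorize items by region (label each item once, then build each bucket by a filter)."""
--     regions = config.get("regions", {})
--     table = [(region, [kw.lower() for kw in data.get("keywords", [])])
--              for region, data in regions.items()]
--
--     def label(item):
--         text = f"{item.get('title', '')} {item.get('description', '')}".lower()
--         return next((r for r, kws in table if any(k in text for k in kws)), "other")
--
--     labels = [label(item) for item in items]
--
--     out = {region: [] for region in regions}
--     out["other"] = []
--     for r in out:
--         out[r] = [item for item, l in zip(items, labels) if l == r]
--     return out
-- ===== Notes on version B (the rewrite author's own statement) =====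
-- stated objective: alternative
-- what changed: B lowers all keywords and each item's text once up front, labels every item with its first matching region in a single scan, and builds each output bucket as a filter over the labelled items, instead of A's nested region/keyword loops with a matched flag that re-lower the text and keywords on every comparison and append into the dict in place.
import Mathlib
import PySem

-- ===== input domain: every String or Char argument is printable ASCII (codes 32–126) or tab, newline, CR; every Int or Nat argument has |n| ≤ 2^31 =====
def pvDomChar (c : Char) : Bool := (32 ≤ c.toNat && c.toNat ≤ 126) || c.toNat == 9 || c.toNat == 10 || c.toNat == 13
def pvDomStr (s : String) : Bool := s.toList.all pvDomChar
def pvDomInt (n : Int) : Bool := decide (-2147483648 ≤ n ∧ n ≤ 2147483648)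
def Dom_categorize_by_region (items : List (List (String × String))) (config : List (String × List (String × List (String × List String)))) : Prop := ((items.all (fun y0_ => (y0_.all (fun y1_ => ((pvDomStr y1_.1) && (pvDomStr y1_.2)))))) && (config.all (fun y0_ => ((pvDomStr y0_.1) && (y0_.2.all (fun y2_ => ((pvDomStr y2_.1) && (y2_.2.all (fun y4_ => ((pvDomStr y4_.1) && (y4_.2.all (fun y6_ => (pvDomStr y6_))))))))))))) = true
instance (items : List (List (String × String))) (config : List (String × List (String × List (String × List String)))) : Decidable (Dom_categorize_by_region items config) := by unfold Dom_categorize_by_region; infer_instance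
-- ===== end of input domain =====

-- B differs from A by lowering every keyword and each item's text ONCE, labelling each item with its
-- region by a single first-match scan, and building each output bucket as a filter over the labelled
-- items (objective: an alternative, plainer decomposition; same return value).

-- ===== PORT A =====
def categorize_by_region (items : List (List (String × String))) (config : List (String × List (String × List (String × List String)))) : List (String × List (List (String × String))) :=
  let regions := (PySem.Dict.ofList config).getD "regions" []
  let rdict := PySem.Dict.ofList regions
  let categorized :=
    (rdict.items.foldl (fun d p => d.insert p.1 ([] : List (List (String × String)))) PySem.Dict.empty).insert "other" []
  let final := items.foldl (fun cat item =>
    let idict := PySem.Dict.ofList item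
    let text := PySem.Str.join " " [idict.getD "title" "", idict.getD "description" ""]
    let st := rdict.items.foldl (fun st rp =>
      if st.2 then st
      else
        let keywords := (PySem.Dict.ofList rp.2).getD "keywords" []
        if keywords.any (fun kw => PySem.Str.isIn (PySem.Str.lower kw) (PySem.Str.lower text)) then
          (st.1.modify rp.1 [] (· ++ [item]), true)
        else st) (cat, false)
    if st.2 then st.1 else st.1.modify "other" [] (· ++ [item])) categorized
  final.items

-- ===== PORT B =====
-- the precomputed (region, lowered keywords) table
def pvLowerTable (regions : List (String × List (String × List String))) : List (String × List String) :=
  (PySem.Dict.ofList regions).items.map (fun p => (p.1, ((PySem.Dict.ofList p.2).getD "keywords" []).map PySem.Str.lower))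

-- label(item): first region whose lowered keywords hit the lowered text, else "other"
def pvLabel (table : List (String × List String)) (item : List (String × String)) : String :=
  let idict := PySem.Dict.ofList item
  let text := PySem.Str.lower (PySem.Str.join " " [idict.getD "title" "", idict.getD "description" ""])
  ((table.find? (fun rp => rp.2.any (fun k => PySem.Str.isIn k text))).map (·.1)).getD "other"

def categorize_by_region_alt (items : List (List (String × String))) (config : List (String × List (String × List (String × List String)))) : List (String × List (List (String × String))) :=
  let regions := (PySem.Dict.ofList config).getD "regions" []
  let table := pvLowerTable regions
  let labels := items.map (pvLabel table)
  let out :=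
    ((PySem.Dict.ofList regions).items.foldl (fun d p => d.insert p.1 ([] : List (List (String × String)))) PySem.Dict.empty).insert "other" []
  out.keys.map (fun r => (r, ((items.zip labels).filter (fun pl => pl.2 == r)).map (·.1)))

-- ===== PRECONDITION & SPEC =====
def Spec_categorize_by_region (items : List (List (String × String))) (config : List (String × List (String × List (String × List String)))) (out : List (String × List (List (String × String)))) : Prop := out = categorize_by_region_alt items config
instance (items : List (List (String × String))) (config : List (String × List (String × List (String × List String)))) (out : List (String × List (List (String × String)))) : Decidable (Spec_categorize_by_region items config out) := by unfold Spec_categorize_by_region; infer_instance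

-- ===== CLAIM (what is proved, stated in full; the proofs are below) =====
def Claim_equal_categorize_by_region : Prop := ∀ (items : List (List (String × String))) (config : List (String × List (String × List (String × List String)))), Dom_categorize_by_region items config → Spec_categorize_by_region items config (categorize_by_region items config)

-- ===== LEMMAS AND PROOFS =====

-- once matched, A's region loop keeps its state
theorem pvFold_matched {α β : Type} (rl : List α)
    (step : β × Bool → α → β × Bool)
    (hstep : ∀ st rp, st.2 = true → step st rp = st)
    (c : β) :
    rl.foldl step (c, true) = (c, true) := by
  induction rl with
  | nil => rfl
  | cons rp rl ih => rw [List.foldl_cons, hstep (c, true) rp rfl, ih]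

-- A's region loop over one item is "modify at the first matching region"
theorem pvInner_eq_find (rl : List (String × List (String × List String)))
    (item : List (String × String)) (text : String)
    (c : PySem.Dict String (List (List (String × String)))) :
    rl.foldl (fun st rp =>
      if st.2 then st
      else
        if ((PySem.Dict.ofList rp.2).getD "keywords" []).any (fun kw => PySem.Str.isIn (PySem.Str.lower kw) (PySem.Str.lower text)) then
          (st.1.modify rp.1 [] (· ++ [item]), true)
        else st) (c, false)
    = match rl.find? (fun rp => ((PySem.Dict.ofList rp.2).getD "keywords" []).any (fun kw => PySem.Str.isIn (PySem.Str.lower kw) (PySem.Str.lower text))) with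
      | some rp => (c.modify rp.1 [] (· ++ [item]), true)
      | none => (c, false) := by
  induction rl generalizing c with
  | nil => rfl
  | cons rp rl ih =>
    by_cases h : ((PySem.Dict.ofList rp.2).getD "keywords" []).any (fun kw => PySem.Str.isIn (PySem.Str.lower kw) (PySem.Str.lower text)) = true
    · rw [List.find?_cons_of_pos (l := rl) h]
      simp only [List.foldl_cons, Bool.false_eq_true, if_false, if_pos h]
      exact pvFold_matched rl _ (fun st rp hst => by simp [hst]) _
    -- unmatched head: the step keeps (c, false)
    · rw [List.find?_cons_of_neg (l := rl) h]
      simp only [List.foldl_cons, Bool.false_eq_true, if_false, if_neg h]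
      exact ih c

-- B's find? over the lowered table is A's find? over the raw regions
theorem pvTable_find (rl : List (String × List (String × List String))) (text : String) :
    (rl.map (fun p => (p.1, ((PySem.Dict.ofList p.2).getD "keywords" []).map PySem.Str.lower))).find?
        (fun rp => rp.2.any (fun k => PySem.Str.isIn k (PySem.Str.lower text)))
    = (rl.find? (fun rp => ((PySem.Dict.ofList rp.2).getD "keywords" []).any (fun kw => PySem.Str.isIn (PySem.Str.lower kw) (PySem.Str.lower text)))).map
        (fun p => (p.1, ((PySem.Dict.ofList p.2).getD "keywords" []).map PySem.Str.lower)) := by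
  rw [List.find?_map]
  congr 1
  congr 1
  funext p
  simp [List.any_map, Function.comp_def, PySem.Str.toList_lower]

-- the modify loop keeps the keys when every touched key is already present
theorem pvFold_keys (l : List (String × List (String × String)))
    (d : PySem.Dict String (List (List (String × String))))
    (h : ∀ p ∈ l, d.contains p.1 = true) :
    (l.foldl (fun d p => d.modify p.1 [] (· ++ [p.2])) d).keys = d.keys := by
  induction l generalizing d with
  | nil => rfl
  | cons p l ih =>
    have hk : d.contains p.1 = true := h p (List.mem_cons_self)
    have hkeys : (d.modify p.1 [] (· ++ [p.2])).keys = d.keys := by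
      rw [PySem.Dict.keys_modify, PySem.Dict.keys_insert_of_contains _ _ hk]
    simp only [List.foldl_cons]
    rw [ih _ (fun q hq => by
      rw [PySem.Dict.contains_modify]
      simp [h q (List.mem_cons_of_mem _ hq)])]
    exact hkeys

-- every value of the seed dict is []
theorem pvSeed_getD (l : List (String × List (String × List String)))
    (d : PySem.Dict String (List (List (String × String))))
    (h : ∀ r, d.getD r [] = []) (r : String) :
    ((l.foldl (fun d p => d.insert p.1 ([] : List (List (String × String)))) d).insert "other" []).getD r [] = [] := by
  rw [PySem.Dict.getD_insert]
  split
  · rfl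
  · induction l generalizing d with
    | nil => exact h r
    | cons p l ih =>
      simp only [List.foldl_cons]
      exact ih _ (fun r' => by rw [PySem.Dict.getD_insert]; split <;> simp [h])

-- the label of every item is a key of the seed dict
theorem pvLabel_mem_keys (rl : List (String × List (String × List String)))
    (item : List (String × String)) :
    pvLabel (rl.map (fun p => (p.1, ((PySem.Dict.ofList p.2).getD "keywords" []).map PySem.Str.lower))) item
      ∈ ((rl.foldl (fun d p => d.insert p.1 ([] : List (List (String × String)))) PySem.Dict.empty).insert "other" []).keys := by
  rw [PySem.Dict.mem_keys_insert]
  simp only [pvLabel]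
  rw [pvTable_find]
  cases hf : rl.find? (fun rp => ((PySem.Dict.ofList rp.2).getD "keywords" []).any (fun kw => PySem.Str.isIn (PySem.Str.lower kw) (PySem.Str.lower _))) with
  | none => simp
  | some rp =>
    right
    have hmem := List.mem_of_find?_eq_some hf
    rw [PySem.Dict.keys_foldl_insert_key, PySem.Set.mem_update]
    right
    simpa using List.mem_map_of_mem (f := Prod.fst) hmem

-- zip-with-labels filter = pair-list filter
theorem pvZip_filter (items : List (List (String × String))) (g : List (String × String) → String) (r : String) :
    ((items.zip (items.map g)).filter (fun pl => pl.2 == r)).map (·.1)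
    = ((items.map (fun it => (g it, it))).filter (fun p => p.1 == r)).map (·.2) := by
  induction items with
  | nil => rfl
  | cons it items ih =>
    simp only [List.map_cons, List.zip_cons_cons, List.filter_cons]
    by_cases h : (g it == r) = true <;> simp [h, ih]

-- ===== VERDICT (by name: the statement is the Claim_ definition above) =====
theorem categorize_by_region_spec : Claim_equal_categorize_by_region := by
  intro items config _
  show categorize_by_region items config = categorize_by_region_alt items config
  simp only [categorize_by_region, categorize_by_region_alt, pvLowerTable]
  generalize (PySem.Dict.ofList config).getD "regions" [] = rl
  rw [PySem.List.foldl_congr_mem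
    (g := fun cat item => cat.modify (pvLabel ((PySem.Dict.ofList rl).items.map (fun p => (p.1, ((PySem.Dict.ofList p.2).getD "keywords" []).map PySem.Str.lower))) item) [] (· ++ [item])) _ _ _ ?hpt]
  case hpt =>
    intro cat item _
    rw [pvInner_eq_find]
    simp only [pvLabel]
    rw [pvTable_find]
    cases hf : (PySem.Dict.ofList rl).items.find? (fun rp => ((PySem.Dict.ofList rp.2).getD "keywords" []).any (fun kw => PySem.Str.isIn (PySem.Str.lower kw) (PySem.Str.lower (PySem.Str.join " " [(PySem.Dict.ofList item).getD "title" "", (PySem.Dict.ofList item).getD "description" ""])))) with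
    | none => simp
    | some rp => simp
  have hmap : List.foldl (fun (d : PySem.Dict String (List (List (String × String)))) (p : String × List (String × String)) => d.modify p.1 [] (· ++ [p.2]))
        ((List.foldl (fun d p => d.insert p.1 ([] : List (List (String × String)))) PySem.Dict.empty (PySem.Dict.ofList rl).items).insert "other" [])
        (items.map (fun it => (pvLabel ((PySem.Dict.ofList rl).items.map (fun p => (p.1, ((PySem.Dict.ofList p.2).getD "keywords" []).map PySem.Str.lower))) it, it)))
      = List.foldl (fun cat item => cat.modify (pvLabel ((PySem.Dict.ofList rl).items.map (fun p => (p.1, ((PySem.Dict.ofList p.2).getD "keywords" []).map PySem.Str.lower))) item) [] (· ++ [item]))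
        ((List.foldl (fun d p => d.insert p.1 ([] : List (List (String × String)))) PySem.Dict.empty (PySem.Dict.ofList rl).items).insert "other" []) items :=
    List.foldl_map
  rw [← hmap]
  have hnodseed : (((PySem.Dict.ofList rl).items.foldl (fun d p => d.insert p.1 ([] : List (List (String × String)))) PySem.Dict.empty).insert "other" ([] : List (List (String × String)))).keys.Nodup :=
    PySem.Dict.nodup_keys_insert _ _ _ (PySem.Dict.nodup_keys_foldl_insert_key _ _ _ _ (by simp [PySem.Dict.keys_empty]))
  have hcont : ∀ p ∈ items.map (fun it => (pvLabel ((PySem.Dict.ofList rl).items.map (fun p => (p.1, ((PySem.Dict.ofList p.2).getD "keywords" []).map PySem.Str.lower))) it, it)),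
      (((PySem.Dict.ofList rl).items.foldl (fun d p => d.insert p.1 ([] : List (List (String × String)))) PySem.Dict.empty).insert "other" ([] : List (List (String × String)))).contains p.1 = true := by
    intro p hp
    obtain ⟨it, -, rfl⟩ := List.mem_map.mp hp
    exact (PySem.Dict.contains_iff_mem_keys _ _).mpr (pvLabel_mem_keys (PySem.Dict.ofList rl).items it)
  have hkeys := pvFold_keys _ _ hcont
  rw [PySem.Dict.items_eq_map_keys _ (hkeys ▸ hnodseed) [], hkeys]
  refine List.map_congr_left ?_
  intro r _
  refine congrArg (Prod.mk r) ?_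
  rw [PySem.Dict.getD_foldl_modify_append,
    pvSeed_getD (PySem.Dict.ofList rl).items PySem.Dict.empty (fun r => PySem.Dict.getD_empty r []) r,
    pvZip_filter]
  simp
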